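-- pv_equiv track=rewrite | github.com/ASSERT-KTH/Mokav | experiments/pynguin/c4b/return-lst/generated_tests/src_1675/2/src_1675.py | func
-- ===== SOURCE A (Python) =====
-- def func(*args):
-- 	ret_values = []
--
-- 	n = int(args[0])
-- 	x = (n // 4)
-- 	y = ((n // 7) + 1)
-- 	flag = False
-- 	for i in range(0, (x + 1)):
-- 	    if (flag == True):
-- 	        break
-- 	    for j in range(0, (y + 1)):
-- 	        if (((i * 4) + (j * 7)) == n):
-- 	            s = ((i * '4') + (j * '7'))
-- 	            flag = True
-- 	            ret_values.append(s)
-- 	            break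
-- 	if (flag == False):
-- 	    ret_values.append('-1')
--
-- 	return ret_values
-- ===== SOURCE B (Python) =====
-- def func(*args):
--     ret_values = []
--     n = int(args[0])
--     # 4*i + 7*j = n with i, j >= 0 and i minimal: since gcd(4,7)=1,
--     # any solution has i ≡ 2*n (mod 7) (2 is the inverse of 4 mod 7),
--     # so the minimal candidate is i = (2*n) % 7, and it works iff 4*i <= n.
--     i = (2 * n) % 7
--     if n >= 0 and 4 * i <= n:
--         j = (n - 4 * i) // 7
--         ret_values.append(i * '4' + j * '7')
--     else:
--         ret_values.append('-1')
--     return ret_values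
-- ===== Notes on version B (the rewrite author's own statement) =====
-- stated objective: faster
-- what changed: Replaced the nested search over i in 0..n//4 and j in 0..n//7 by solving the linear Diophantine equation directly: the minimal i is (2*n) % 7 (2 being the inverse of 4 mod 7), checked against 4*i <= n, with j computed by one division.
import Mathlib
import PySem

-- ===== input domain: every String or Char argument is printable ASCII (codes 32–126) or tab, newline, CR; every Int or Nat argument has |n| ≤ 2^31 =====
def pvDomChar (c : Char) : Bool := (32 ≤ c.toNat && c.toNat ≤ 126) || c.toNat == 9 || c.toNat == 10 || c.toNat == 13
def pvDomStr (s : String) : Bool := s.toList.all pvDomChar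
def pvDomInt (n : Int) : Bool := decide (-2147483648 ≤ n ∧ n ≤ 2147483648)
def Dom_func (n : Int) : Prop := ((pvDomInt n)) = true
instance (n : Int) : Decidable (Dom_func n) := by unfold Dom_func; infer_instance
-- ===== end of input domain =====

-- B replaces A's nested O(n^2) search by the O(1) modular solution i = (2*n) % 7 (objective: faster).

-- ===== PORT A =====
-- the string  i*'4' + j*'7'
def pvStr47 (i j : Int) : String :=
  String.ofList (PySem.List.pyRepeat ['4'] i ++ PySem.List.pyRepeat ['7'] j)

-- inner 'for j in range(0, y+1): if i*4+j*7 == n: … break' — returns the appended string if the break fires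
def innerA (n i : Int) : List Int → Option String
  | [] => none
  | j :: rest => if i * 4 + j * 7 = n then some (pvStr47 i j) else innerA n i rest

-- outer 'for i in range(0, x+1)' with the flag-break: stops at the first i whose inner loop appended
def outerA (n y : Int) : List Int → Option String
  | [] => none
  | i :: rest =>
    match innerA n i (PySem.List.pyRange 0 (y + 1) 1) with
    | some s => some s
    | none => outerA n y rest

def func (n : Int) : List String :=
  let x := PySem.Int.floordiv n 4
  let y := PySem.Int.floordiv n 7 + 1
  match outerA n y (PySem.List.pyRange 0 (x + 1) 1) with
  | some s => [s]
  | none => ["-1"]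

-- ===== PORT B =====
def func_alt (n : Int) : List String :=
  let i := PySem.Int.mod (2 * n) 7
  if 0 ≤ n ∧ 4 * i ≤ n then
    let j := PySem.Int.floordiv (n - 4 * i) 7
    [pvStr47 i j]
  else ["-1"]

-- ===== PRECONDITION & SPEC =====
def Spec_func (n : Int) (out : List String) : Prop := out = func_alt n
instance (n : Int) (out : List String) : Decidable (Spec_func n out) := by unfold Spec_func; infer_instance

-- ===== CLAIM (what is proved, stated in full; the proofs are below) =====
def Claim_equal_func : Prop := ∀ (n : Int), Dom_func n → Spec_func n (func n)

-- ===== LEMMAS AND PROOFS =====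

theorem innerA_none (n i : Int) (l : List Int) (h : ∀ j ∈ l, i * 4 + j * 7 ≠ n) :
    innerA n i l = none := by
  induction l with
  | nil => rfl
  | cons j rest ih =>
    simp only [innerA]
    rw [if_neg (h j (by simp))]
    exact ih (fun j' hj' => h j' (by simp [hj']))

theorem innerA_some (n i : Int) (l : List Int) (j : Int) (hmem : j ∈ l)
    (heq : i * 4 + j * 7 = n) : innerA n i l = some (pvStr47 i j) := by
  induction l with
  | nil => simp at hmem
  | cons j' rest ih =>
    simp only [innerA]
    by_cases h : i * 4 + j' * 7 = n
    · have : j' = j := by omega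
      subst this; simp [h]
    · rw [if_neg h]
      rcases List.mem_cons.mp hmem with h1 | h1
      · exact absurd (h1 ▸ heq) h
      · exact ih h1

theorem outerA_none (n y : Int) (l : List Int)
    (h : ∀ i ∈ l, innerA n i (PySem.List.pyRange 0 (y + 1) 1) = none) :
    outerA n y l = none := by
  induction l with
  | nil => rfl
  | cons i rest ih =>
    simp only [outerA]
    rw [h i (by simp)]
    exact ih (fun i' hi' => h i' (by simp [hi']))

theorem outerA_some (n y : Int) (l : List Int) (i : Int) (s : String) (hmem : i ∈ l)
    (hi : innerA n i (PySem.List.pyRange 0 (y + 1) 1) = some s)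
    (hbefore : ∀ i' ∈ l, i' < i → innerA n i' (PySem.List.pyRange 0 (y + 1) 1) = none)
    (hsorted : l.Pairwise (· < ·)) :
    outerA n y l = some s := by
  induction l with
  | nil => simp at hmem
  | cons i' rest ih =>
    simp only [outerA]
    rcases List.mem_cons.mp hmem with h1 | h1
    · subst h1; rw [hi]
    · have hlt : i' < i := (List.pairwise_cons.mp hsorted).1 i h1
      rw [hbefore i' (by simp) hlt]
      exact ih h1 (fun i'' hi'' h'' => hbefore i'' (by simp [hi'']) h'')
        (List.pairwise_cons.mp hsorted).2

theorem func_eq_alt (n : Int) : func n = func_alt n := by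
  have hmod : PySem.Int.mod (2 * n) 7 = (2 * n) % 7 :=
    PySem.Int.mod_eq_emod_of_pos (by norm_num)
  have hx : PySem.Int.floordiv n 4 = n / 4 :=
    PySem.Int.floordiv_eq_ediv_of_pos (by norm_num)
  have hy : PySem.Int.floordiv n 7 = n / 7 :=
    PySem.Int.floordiv_eq_ediv_of_pos (by norm_num)
  have hj : PySem.Int.floordiv (n - 4 * ((2 * n) % 7)) 7 = (n - 4 * ((2 * n) % 7)) / 7 :=
    PySem.Int.floordiv_eq_ediv_of_pos (by norm_num)
  by_cases hcond : 0 ≤ n ∧ 4 * ((2 * n) % 7) ≤ n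
  · -- a solution exists: A's loop stops at i = (2*n) % 7
    obtain ⟨hn, hle⟩ := hcond
    have houter :
        outerA n (PySem.Int.floordiv n 7 + 1) (PySem.List.pyRange 0 (PySem.Int.floordiv n 4 + 1) 1)
          = some (pvStr47 ((2 * n) % 7) ((n - 4 * ((2 * n) % 7)) / 7)) := by
      apply outerA_some _ _ _ ((2 * n) % 7)
      · rw [PySem.List.mem_pyRange_one, hx]; omega
      · apply innerA_some _ _ _ ((n - 4 * ((2 * n) % 7)) / 7)
        · rw [PySem.List.mem_pyRange_one, hy]; omega
        · omega
      · intro i' hi' hlt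
        apply innerA_none
        intro j hjmem
        rw [PySem.List.mem_pyRange_one] at hi' hjmem
        omega
      · exact PySem.List.pairwise_lt_pyRange_one 0 _
    simp only [func, func_alt, houter, hmod, hj]
    rw [if_pos (show 0 ≤ n ∧ 4 * ((2 * n) % 7) ≤ n from ⟨hn, hle⟩)]
  · -- no solution: both return ["-1"]
    have houter :
        outerA n (PySem.Int.floordiv n 7 + 1) (PySem.List.pyRange 0 (PySem.Int.floordiv n 4 + 1) 1)
          = none := by
      apply outerA_none
      intro i hi
      apply innerA_none
      intro j hjm
      rw [PySem.List.mem_pyRange_one, hx] at hi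
      rw [PySem.List.mem_pyRange_one, hy] at hjm
      intro heq
      have h1 : 2 * n % 7 = i % 7 := by
        rw [← heq]
        have h2 : 2 * (i * 4 + j * 7) = i + 7 * (i + 2 * j) := by ring
        rw [h2, Int.add_mul_emod_self_left]
      omega
    simp only [func, func_alt, houter, hmod]
    rw [if_neg hcond]

-- ===== VERDICT (by name: the statement is the Claim_ definition above) =====
theorem func_spec : Claim_equal_func := by
  intro n _
  exact func_eq_alt n
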